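-- pv_equiv track=rewrite | github.com/jfbriggs/python-code-problems | caesar_cypher_variation.py | moving_shift
-- ===== SOURCE A (Python) =====
-- from math import ceil
--
-- def moving_shift(s, shift):
--     shifted_string = ""
--
--     # shift forward helper function
--     def shift_forward(c, n):
--         char_value = ord(c)
--         if (char_value >= 65) and (char_value <= 90): # capital letter
--             char_value = char_value + (n % 26)
--             if char_value > 90:
--                 char_value = char_value - 90 + 64
--         elif (char_value >= 97) and (char_value <= 122): # lowercase
--             char_value = char_value + (n % 26)
--             if char_value > 122:
--                 char_value = char_value - 122 + 96
--
--         return chr(char_value)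
--
--     # shift all characters in string
--     for char in s:
--         shifted_string += shift_forward(char, shift)
--         shift += 1
--
--     # generate list of split values
--     splits = []
--     length = len(s)
--
--     if length % 5 != 0:
--         split_value = ceil(length / 5)
--     else:
--         split_value = int(length / 5)
--
--     while len(splits) < 5:
--         if length >= split_value:
--             splits.append(split_value)
--             length -= split_value
--         else:
--             splits.append(length)
--             length -= length
--
--     # generate split string
--     result = []
--     for val in splits:
--         result.append(shifted_string[:val])
--         shifted_string = shifted_string[val:]
--
--     # return split string
--     return result
-- ===== SOURCE B (Python) =====
-- def moving_shift(s, shift):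
--     # Recursive chunker: never builds the full shifted string; each of the 5
--     # chunks is sliced from the original and encrypted lazily with a
--     # closed-form per-index formula.
--     sv = (len(s) + 4) // 5
--
--     def enc(chunk, base):
--         out = []
--         for j, c in enumerate(chunk):
--             o = ord(c)
--             if 65 <= o <= 90:
--                 out.append(chr((o - 65 + base + j) % 26 + 65))
--             elif 97 <= o <= 122:
--                 out.append(chr((o - 97 + base + j) % 26 + 97))
--             else:
--                 out.append(c)
--         return "".join(out)
--
--     def go(rest, idx, k):
--         if k == 0:
--             return []
--         return [enc(rest[:sv], shift + idx)] + go(rest[sv:], idx + sv, k - 1)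
--
--     return go(s, 0, 5)
-- ===== Notes on version B (the rewrite author's own statement) =====
-- stated objective: alternative
-- what changed: A shifts the whole string with a stateful accumulating loop, builds a list of 5 split lengths with a while loop, then slices in a second loop; B never builds the shifted string: a recursive chunker takes 5 slices of size (n+4)//5 straight off the original string and encrypts each chunk on demand with a closed-form (ord-base+shift+index)%26 formula.
import Mathlib
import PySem

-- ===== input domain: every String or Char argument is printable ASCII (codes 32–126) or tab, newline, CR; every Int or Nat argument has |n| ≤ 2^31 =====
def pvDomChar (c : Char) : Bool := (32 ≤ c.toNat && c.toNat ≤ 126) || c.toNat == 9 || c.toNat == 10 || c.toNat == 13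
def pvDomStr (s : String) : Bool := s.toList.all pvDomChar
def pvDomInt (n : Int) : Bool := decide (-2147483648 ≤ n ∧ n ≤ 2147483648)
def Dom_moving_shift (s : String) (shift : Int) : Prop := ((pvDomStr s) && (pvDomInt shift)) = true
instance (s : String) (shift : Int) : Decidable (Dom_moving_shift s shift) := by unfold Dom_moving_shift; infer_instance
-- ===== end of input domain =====

-- B replaces A's shift-everything-then-split-twice pipeline by a recursive chunker
-- that slices 5 blocks directly off the original string and encrypts each chunk
-- lazily with a closed-form per-index formula (objective: alternative).

-- ===== PORT A =====
-- helper `shift_forward` of A, literal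
def shiftForwardA (c : Char) (n : Int) : Char :=
  let cv : Int := (c.toNat : Int)
  if 65 ≤ cv ∧ cv ≤ 90 then
    let cv := cv + PySem.Int.mod n 26
    let cv := if cv > 90 then cv - 90 + 64 else cv
    Char.ofNat cv.toNat
  else if 97 ≤ cv ∧ cv ≤ 122 then
    let cv := cv + PySem.Int.mod n 26
    let cv := if cv > 122 then cv - 122 + 96 else cv
    Char.ofNat cv.toNat
  else
    Char.ofNat cv.toNat

-- `while len(splits) < 5` loop of A: the counter `5 - len(splits)` is the fuel
def splitsLoopA : Nat → Int → Int → List Int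
  | 0, _, _ => []
  | k + 1, length, sv =>
      if length ≥ sv then sv :: splitsLoopA k (length - sv) sv
      else length :: splitsLoopA k (length - length) sv

-- `for val in splits` loop of A
def chunksLoopA : List Int → List Char → List String
  | [], _ => []
  | v :: vs, rem =>
      String.ofList (PySem.List.slice rem none (some v)) :: chunksLoopA vs (PySem.List.slice rem (some v) none)

def moving_shift (s : String) (shift : Int) : List String :=
  let st := s.toList.foldl (fun (st : List Char × Int) c => (st.1 ++ [shiftForwardA c st.2], st.2 + 1)) ([], shift)
  let shifted := st.1
  let length : Int := (s.toList.length : Int)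
  -- math.ceil(length/5) is exact here (0 ≤ length ≤ 2^31): ported as -((-length) // 5)
  let split_value : Int :=
    if PySem.Int.mod length 5 ≠ 0 then -(PySem.Int.floordiv (-length) 5)
    else PySem.Int.floordiv length 5
  chunksLoopA (splitsLoopA 5 length split_value) shifted

-- ===== PORT B =====
-- B's helper `enc(chunk, base)`
def encB (chunk : List Char) (base : Int) : List Char :=
  (PySem.List.enumerate chunk 0).map (fun p =>
    let o : Int := (p.2.toNat : Int)
    if 65 ≤ o ∧ o ≤ 90 then Char.ofNat (PySem.Int.mod (o - 65 + base + p.1) 26 + 65).toNat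
    else if 97 ≤ o ∧ o ≤ 122 then Char.ofNat (PySem.Int.mod (o - 97 + base + p.1) 26 + 97).toNat
    else p.2)

-- B's recursive helper `go(rest, idx, k)`; k is the structural fuel
def goB (sv shift : Int) : Nat → List Char → Int → List String
  | 0, _, _ => []
  | k + 1, rest, idx =>
      String.ofList (encB (PySem.List.slice rest none (some sv)) (shift + idx))
        :: goB sv shift k (PySem.List.slice rest (some sv) none) (idx + sv)

def moving_shift_alt (s : String) (shift : Int) : List String :=
  let sv := PySem.Int.floordiv ((s.toList.length : Int) + 4) 5
  goB sv shift 5 s.toList 0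

-- ===== PRECONDITION & SPEC =====
def Spec_moving_shift (s : String) (shift : Int) (out : List String) : Prop := out = moving_shift_alt s shift
instance (s : String) (shift : Int) (out : List String) : Decidable (Spec_moving_shift s shift out) := by unfold Spec_moving_shift; infer_instance

-- ===== CLAIM (what is proved, stated in full; the proofs are below) =====
def Claim_equal_moving_shift : Prop := ∀ (s : String) (shift : Int), Dom_moving_shift s shift → Spec_moving_shift s shift (moving_shift s shift)

-- ===== LEMMAS AND PROOFS =====

-- B's per-character formula, as a standalone function
def shiftCharB (c : Char) (k : Int) : Char :=
  let o : Int := (c.toNat : Int)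
  if 65 ≤ o ∧ o ≤ 90 then Char.ofNat (PySem.Int.mod (o - 65 + k) 26 + 65).toNat
  else if 97 ≤ o ∧ o ≤ 122 then Char.ofNat (PySem.Int.mod (o - 97 + k) 26 + 97).toNat
  else c

lemma encB_eq_map (chunk : List Char) (base : Int) :
    encB chunk base = (PySem.List.enumerate chunk 0).map (fun p => shiftCharB p.2 (base + p.1)) := by
  unfold encB shiftCharB
  apply List.map_congr_left
  intro p _
  dsimp only
  rw [show ((p.2.toNat : Int) - 65 + base + p.1) = ((p.2.toNat : Int) - 65 + (base + p.1)) from by ring,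
      show ((p.2.toNat : Int) - 97 + base + p.1) = ((p.2.toNat : Int) - 97 + (base + p.1)) from by ring]

-- the two per-character shifts agree
lemma shiftChar_eq (c : Char) (n : Int) : shiftForwardA c n = shiftCharB c n := by
  unfold shiftForwardA shiftCharB
  have h1 : PySem.Int.mod n 26 = n % 26 := PySem.Int.mod_eq_emod_of_pos (by omega)
  have h2 : PySem.Int.mod ((c.toNat : Int) - 65 + n) 26 = ((c.toNat : Int) - 65 + n) % 26 :=
    PySem.Int.mod_eq_emod_of_pos (by omega)
  have h3 : PySem.Int.mod ((c.toNat : Int) - 97 + n) 26 = ((c.toNat : Int) - 97 + n) % 26 :=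
    PySem.Int.mod_eq_emod_of_pos (by omega)
  simp only [h1, h2, h3]
  split_ifs with hA hw hB hw2 <;> try (congr 1; omega)
  · exact Char.ofNat_toNat c

-- shorthand for A's fully shifted string (as a list of B-shifted chars)
def aMap (l : List Char) (shift : Int) : List Char :=
  (PySem.List.enumerate l 0).map (fun p => shiftCharB p.2 (shift + p.1))

-- A's accumulating loop computes aMap
lemma fold_eq (l : List Char) (acc : List Char) (sh st : Int) :
    (l.foldl (fun (p : List Char × Int) c => (p.1 ++ [shiftForwardA c p.2], p.2 + 1)) (acc, sh)).1
      = acc ++ (PySem.List.enumerate l st).map (fun p => shiftCharB p.2 (sh - st + p.1)) := by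
  induction l generalizing acc sh st with
  | nil => simp [PySem.List.enumerate_nil]
  | cons c rest ih =>
    simp only [List.foldl_cons, PySem.List.enumerate_cons, List.map_cons]
    rw [ih (acc ++ [shiftForwardA c sh]) (sh + 1) (st + 1)]
    have : sh + 1 - (st + 1) = sh - st := by ring
    simp [this, shiftChar_eq]

lemma splitsLoop_zero (k : Nat) (sv : Int) (hsv : 0 < sv) :
    splitsLoopA k 0 sv = List.replicate k 0 := by
  induction k with
  | zero => rfl
  | succ k ih =>
    rw [splitsLoopA, if_neg (by omega), sub_self, ih, List.replicate_succ]

lemma chunksLoop_replicate (k : Nat) :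
    chunksLoopA (List.replicate k (0 : Int)) [] = List.replicate k "" := by
  induction k with
  | zero => rfl
  | succ k ih =>
    rw [List.replicate_succ, chunksLoopA, List.replicate_succ,
        PySem.List.slice_to ([] : List Char) (by norm_num : (0:Int) ≤ 0),
        PySem.List.slice_from ([] : List Char) (by norm_num : (0:Int) ≤ 0)]
    simp [ih]

-- A's splits-then-chunks process equals taking blocks of m at multiples of m
lemma chunks_eq (k : Nat) (t : List Char) (m : Nat) :
    chunksLoopA (splitsLoopA k (t.length : Int) (m : Int)) t
      = (List.range k).map (fun (i : Nat) => String.ofList ((t.drop (i * m)).take m)) := by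
  induction k generalizing t with
  | zero => rfl
  | succ k ih =>
    rw [List.range_succ_eq_map, List.map_cons, List.map_map]
    by_cases h : m ≤ t.length
    · rw [splitsLoopA, if_pos (by omega), chunksLoopA,
          PySem.List.slice_to t (by positivity : (0:Int) ≤ (m:Int)),
          PySem.List.slice_from t (by positivity : (0:Int) ≤ (m:Int)),
          Int.toNat_natCast]
      have hlen : ((t.drop m).length : Int) = (t.length : Int) - (m : Int) := by simp; omega
      have := ih (t.drop m)
      rw [hlen] at this
      rw [this]
      congr 1
      · simp
      · apply List.map_congr_left
        intro i _
        simp only [Function.comp_apply, List.drop_drop]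
        have hsm : i.succ * m = m + i * m := by rw [Nat.succ_mul]; omega
        rw [hsm]
    · rw [not_le] at h
      rw [splitsLoopA, if_neg (by omega), sub_self,
          splitsLoop_zero k (m : Int) (by omega), chunksLoopA,
          PySem.List.slice_to t (by positivity : (0:Int) ≤ (t.length : Int)),
          PySem.List.slice_from t (by positivity : (0:Int) ≤ (t.length : Int))]
      simp only [Int.toNat_natCast, List.drop_length, List.take_length]
      rw [chunksLoop_replicate]
      congr 1
      · rw [Nat.zero_mul, List.drop_zero, List.take_of_length_le (le_of_lt h)]
      · symm
        rw [List.eq_replicate_iff]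
        refine ⟨by simp, ?_⟩
        intro b hb
        simp only [List.mem_map, Function.comp_apply] at hb
        obtain ⟨i, _, rfl⟩ := hb
        have hnil : t.drop (i.succ * m) = [] := by
          apply List.drop_eq_nil_of_le
          calc t.length ≤ m := le_of_lt h
            _ ≤ i.succ * m := Nat.le_mul_of_pos_left m (Nat.succ_pos i)
        rw [hnil, List.take_nil]

-- A's conditional ceil equals B's (n+4)//5
lemma sv_eq (L : Int) :
    (if PySem.Int.mod L 5 ≠ 0 then -(PySem.Int.floordiv (-L) 5) else PySem.Int.floordiv L 5)
      = PySem.Int.floordiv (L + 4) 5 := by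
  rw [PySem.Int.mod_eq_emod_of_pos (by omega : (0:Int) < 5),
      PySem.Int.floordiv_eq_ediv_of_pos (by omega : (0:Int) < 5),
      PySem.Int.floordiv_eq_ediv_of_pos (by omega : (0:Int) < 5),
      PySem.Int.floordiv_eq_ediv_of_pos (by omega : (0:Int) < 5)]
  split_ifs <;> omega

-- enumerate shifts its start by a map on the index
lemma enumerate_add (xs : List Char) (st c : Int) :
    PySem.List.enumerate xs (st + c) = (PySem.List.enumerate xs st).map (fun p => (p.1 + c, p.2)) := by
  induction xs generalizing st with
  | nil => simp [PySem.List.enumerate_nil]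
  | cons x xs ih =>
    rw [PySem.List.enumerate_cons, PySem.List.enumerate_cons, List.map_cons]
    have : st + c + 1 = (st + 1) + c := by ring
    rw [this, ih]

-- drop / take commute with enumerate
lemma enumerate_drop (xs : List Char) (d : Nat) (st : Int) :
    (PySem.List.enumerate xs st).drop d = PySem.List.enumerate (xs.drop d) (st + d) := by
  induction xs generalizing d st with
  | nil => simp [PySem.List.enumerate_nil]
  | cons x xs ih =>
    cases d with
    | zero => simp
    | succ d =>
      rw [PySem.List.enumerate_cons, List.drop_succ_cons, List.drop_succ_cons, ih]
      congr 1
      push_cast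
      omega

lemma enumerate_take (xs : List Char) (m : Nat) (st : Int) :
    (PySem.List.enumerate xs st).take m = PySem.List.enumerate (xs.take m) st := by
  induction xs generalizing m st with
  | nil => simp [PySem.List.enumerate_nil]
  | cons x xs ih =>
    cases m with
    | zero => simp [PySem.List.enumerate_nil]
    | succ m =>
      rw [PySem.List.enumerate_cons, List.take_succ_cons, List.take_succ_cons,
          PySem.List.enumerate_cons, ih]

-- a drop-take block of A's shifted string is B's chunk encryption
lemma chunk_shift (l : List Char) (shift : Int) (d m : Nat) :
    ((aMap l shift).drop d).take m = encB ((l.drop d).take m) (shift + d) := by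
  rw [encB_eq_map]
  unfold aMap
  rw [← List.map_drop, enumerate_drop, ← List.map_take, enumerate_take]
  rw [enumerate_add, List.map_map]
  apply List.map_congr_left
  intro p _
  simp only [Function.comp_apply]
  congr 1
  ring

-- B's recursion computes the drop-take blocks of A's shifted string
lemma goB_eq (k : Nat) (l : List Char) (shift : Int) (m : Nat) (d : Nat) :
    goB (m : Int) shift k (l.drop d) (d : Int)
      = (List.range k).map (fun (i : Nat) =>
          String.ofList (((aMap l shift).drop (d + i * m)).take m)) := by
  induction k generalizing d with
  | zero => rfl
  | succ k ih =>
    rw [goB, List.range_succ_eq_map, List.map_cons, List.map_map,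
        PySem.List.slice_to (l.drop d) (by positivity : (0:Int) ≤ (m:Int)),
        PySem.List.slice_from (l.drop d) (by positivity : (0:Int) ≤ (m:Int)),
        Int.toNat_natCast, List.drop_drop]
    have hcast : (d : Int) + (m : Int) = ((d + m : Nat) : Int) := by push_cast; ring
    rw [hcast, ih (d + m)]
    congr 1
    · have hd : d + 0 * m = d := by omega
      rw [hd, chunk_shift]
    · apply List.map_congr_left
      intro i _
      simp only [Function.comp_apply]
      congr 3
      rw [Nat.succ_mul]
      omega

-- ===== VERDICT (by name: the statement is the Claim_ definition above) =====
theorem moving_shift_spec : Claim_equal_moving_shift := by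
  intro s shift _
  show moving_shift s shift = moving_shift_alt s shift
  unfold moving_shift moving_shift_alt
  dsimp only
  have hshift :
      (s.toList.foldl (fun (p : List Char × Int) c => (p.1 ++ [shiftForwardA c p.2], p.2 + 1)) ([], shift)).1
        = aMap s.toList shift := by
    rw [fold_eq s.toList [] shift 0]
    unfold aMap
    simp
  rw [hshift, sv_eq]
  have hsvnn : 0 ≤ PySem.Int.floordiv ((s.toList.length : Int) + 4) 5 := by
    rw [PySem.Int.floordiv_eq_ediv_of_pos (by omega : (0:Int) < 5)]
    omega
  set m : Nat := (PySem.Int.floordiv ((s.toList.length : Int) + 4) 5).toNat with hm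
  have hmc : PySem.Int.floordiv ((s.toList.length : Int) + 4) 5 = (m : Int) := by
    rw [hm, Int.toNat_of_nonneg hsvnn]
  have htl : (aMap s.toList shift).length = s.toList.length := by
    unfold aMap
    rw [List.length_map, PySem.List.length_enumerate]
  rw [hmc, ← htl, chunks_eq 5 (aMap s.toList shift) m]
  have hgo := goB_eq 5 s.toList shift m 0
  simp only [List.drop_zero, Nat.cast_zero, zero_add] at hgo
  rw [hgo]
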